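-- pv_equiv track=rewrite | github.com/xiangcao/Leetcode | python_leetcode_2020/Python_Leetcode_2020/uber_practice_4.py | concatenationsSum
-- ===== SOURCE A (Python) =====
-- import collections
--
-- def concatenationsSum(a):
--     total = 0
--
--     length_to_count = collections.defaultdict(int)
--     for num in a:
--         length_to_count[len(str(num))] += 1
--     for i in range(len(a)):
--         for length, count in length_to_count.items():
--             total += a[i] * (count * pow(10, length))
--         total += len(a) * a[i]
--     return total
-- ===== SOURCE B (Python) =====
-- def concatenationsSum(a):
--     s = sum(10 ** len(str(x)) for x in a)
--     return sum(a) * (s + len(a))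
-- ===== Notes on version B (the rewrite author's own statement) =====
-- stated objective: faster
-- what changed: Replaces the nested loop over elements x dict items (O(n*D)) by the closed form sum(a) * (S + n) with S = sum of 10**len(str(x)) computed in one pass.
import Mathlib
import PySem

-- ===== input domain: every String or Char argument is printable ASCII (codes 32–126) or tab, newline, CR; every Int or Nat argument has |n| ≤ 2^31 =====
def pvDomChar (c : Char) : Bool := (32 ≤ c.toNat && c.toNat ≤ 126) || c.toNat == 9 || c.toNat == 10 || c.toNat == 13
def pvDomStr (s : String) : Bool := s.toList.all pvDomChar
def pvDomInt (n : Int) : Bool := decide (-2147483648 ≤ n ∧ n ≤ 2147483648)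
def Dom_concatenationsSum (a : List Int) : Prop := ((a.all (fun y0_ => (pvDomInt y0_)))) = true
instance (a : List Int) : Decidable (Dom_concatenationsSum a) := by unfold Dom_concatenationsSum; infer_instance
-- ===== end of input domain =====

-- B replaces A's nested loop (each element times each dict item) by the closed form
-- sum(a) * (S + len(a)) with S = Σ 10^len(str(x)) computed in one pass — asymptotically faster.

-- ===== PORT A =====
-- len(str(num)) for an integer num
def pyDigitLen (num : Int) : Int := PySem.Str.len (PySem.Int.toStr num)

def concatenationsSum (a : List Int) : Int :=
  -- length_to_count[len(str(num))] += 1 over a (defaultdict(int))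
  let length_to_count : PySem.Dict Int Int :=
    a.foldl (fun d num => d.modify (pyDigitLen num) 0 (· + 1)) PySem.Dict.empty
  -- for i in range(len(a)): for (length, count) in items: total += a[i]*(count*10^length); total += len(a)*a[i]
  -- pow(10, length): length = len(str(num)) ≥ 1, so .toNat is exact here
  (PySem.List.pyRange 0 (PySem.List.len a) 1).foldl
    (fun total i =>
      (length_to_count.items.foldl
          (fun t p => t + (PySem.List.pyGetD a i 0) * (p.2 * 10 ^ p.1.toNat)) total)
        + (PySem.List.len a) * (PySem.List.pyGetD a i 0))
    0

-- ===== PORT B =====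
def concatenationsSum_alt (a : List Int) : Int :=
  let s := (a.map (fun x => (10 : Int) ^ (PySem.Str.len (PySem.Int.toStr x)).toNat)).sum
  a.sum * (s + PySem.List.len a)

-- ===== PRECONDITION & SPEC =====
def Spec_concatenationsSum (a : List Int) (out : Int) : Prop := out = concatenationsSum_alt a
instance (a : List Int) (out : Int) : Decidable (Spec_concatenationsSum a out) := by unfold Spec_concatenationsSum; infer_instance

-- ===== CLAIM (what is proved, stated in full; the proofs are below) =====
def Claim_equal_concatenationsSum : Prop := ∀ (a : List Int), Dom_concatenationsSum a → Spec_concatenationsSum a (concatenationsSum a)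

-- ===== LEMMAS AND PROOFS =====

-- Σ over the distinct elements of l of (count · * f ·) equals Σ over l of f
lemma sum_count_ofList (l : List Int) (f : Int → Int) :
    ((PySem.Set.ofList l).map (fun k => (l.count k : Int) * f k)).sum = (l.map f).sum := by
  have hnd := PySem.Set.nodup_ofList l
  have hfs : (PySem.Set.ofList l).toFinset = l.toFinset := by
    ext x; simp [PySem.Set.mem_ofList]
  calc ((PySem.Set.ofList l).map (fun k => (l.count k : Int) * f k)).sum
      = (PySem.Set.ofList l).toFinset.sum (fun k => (l.count k : Int) * f k) :=
        (List.sum_toFinset _ hnd).symm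
    _ = l.toFinset.sum (fun k => (l.count k : Int) * f k) := by rw [hfs]
    _ = (l.map f).sum := by
        rw [show (l.map f).sum = (Multiset.map f (l : Multiset Int)).sum from rfl,
          Finset.sum_multiset_map_count]
        simp

-- the counter dict A builds is Counter(a.map pyDigitLen)
lemma counter_fold_eq (a : List Int) :
    a.foldl (fun d num => d.modify (pyDigitLen num) 0 (· + 1)) PySem.Dict.empty
      = PySem.Dict.counter (a.map pyDigitLen) := by
  rw [PySem.Dict.counter_eq_foldl, List.foldl_map]

-- ===== VERDICT (by name: the statement is the Claim_ definition above) =====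

theorem concatenationsSum_spec : Claim_equal_concatenationsSum := by
  unfold Claim_equal_concatenationsSum
  intro a _
  unfold Spec_concatenationsSum concatenationsSum concatenationsSum_alt
  dsimp only
  rw [counter_fold_eq]
  set s : Int := (a.map (fun x => (10 : Int) ^ (PySem.Str.len (PySem.Int.toStr x)).toNat)).sum with hs
  set n : Int := PySem.List.len a with hn
  -- the inner item-sum per element x is x * s
  have hW : ∀ x : Int,
      ((PySem.Dict.counter (a.map pyDigitLen)).items.map
        (fun p => x * (p.2 * 10 ^ p.1.toNat))).sum = x * s := by
    intro x
    rw [PySem.Dict.items_counter, List.map_map]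
    have : ((fun p : Int × Int => x * (p.2 * 10 ^ p.1.toNat)) ∘
        fun k => (k, ((a.map pyDigitLen).count k : Int)))
        = fun k => x * (((a.map pyDigitLen).count k : Int) * 10 ^ k.toNat) := rfl
    rw [this]
    calc ((PySem.Set.ofList (a.map pyDigitLen)).map
            (fun k => x * (((a.map pyDigitLen).count k : Int) * 10 ^ k.toNat))).sum
        = x * ((PySem.Set.ofList (a.map pyDigitLen)).map
            (fun k => ((a.map pyDigitLen).count k : Int) * 10 ^ k.toNat)).sum := by
          rw [List.sum_map_mul_left]
      _ = x * ((a.map pyDigitLen).map (fun k => (10 : Int) ^ k.toNat)).sum := by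
          rw [sum_count_ofList]
      _ = x * s := by rw [hs, List.map_map]; rfl
  -- turn the index loop into a loop over a, then into a sum
  rw [show (fun (total i : Int) =>
      ((PySem.Dict.counter (a.map pyDigitLen)).items.foldl
          (fun t p => t + (PySem.List.pyGetD a i 0) * (p.2 * 10 ^ p.1.toNat)) total)
        + n * (PySem.List.pyGetD a i 0))
      = (fun (total i : Int) =>
        (fun (t x : Int) =>
          ((PySem.Dict.counter (a.map pyDigitLen)).items.foldl
            (fun t p => t + x * (p.2 * 10 ^ p.1.toNat)) t) + n * x)
          total (PySem.List.pyGetD a i 0) ) from rfl]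
  rw [PySem.List.foldl_pyRange_zero_pyGetD a 0
      (fun (t x : Int) =>
        ((PySem.Dict.counter (a.map pyDigitLen)).items.foldl
          (fun t p => t + x * (p.2 * 10 ^ p.1.toNat)) t) + n * x) 0]
  have hstep : (fun (t x : Int) =>
      ((PySem.Dict.counter (a.map pyDigitLen)).items.foldl
        (fun t p => t + x * (p.2 * 10 ^ p.1.toNat)) t) + n * x)
      = fun (t x : Int) => t + (x * s + n * x) := by
    funext t x
    rw [PySem.List.foldl_add (PySem.Dict.counter (a.map pyDigitLen)).items
        (fun p : Int × Int => x * (p.2 * 10 ^ p.1.toNat)) t, hW x]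
    ring
  rw [hstep, PySem.List.foldl_add a (fun x => x * s + n * x) 0]
  have : (fun x : Int => x * s + n * x) = fun x : Int => (s + n) * x := by
    funext x; ring
  rw [this, List.sum_map_mul_left, List.map_id']
  ring
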